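-- pv_equiv track=rewrite | github.com/liuminhaw/wrenderer | cmd/server/awsLambda/edgeFunctions/viewer-request/index.py | check_suffix_match
-- ===== SOURCE A (Python) =====
-- def check_suffix_match(uri):
--     suffixes = (
--         '.js',
--         '.css',
--         '.xml',
--         '.less',
--         '.png',
--         '.jpg',
--         '.jpeg',
--         '.gif',
--         '.pdf',
--         '.doc',
--         '.txt',
--         '.ico',
--         '.rss',
--         '.zip',
--         '.mp3',
--         '.rar',
--         '.exe',
--         '.wmv',
--         '.avi',
--         '.ppt',
--         '.mpg',
--         '.mpeg',
--         '.tif',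
--         '.wav',
--         '.mov',
--         '.psd',
--         '.ai',
--         '.xls',
--         '.mp4',
--         '.m4a',
--         '.swf',
--         '.dat',
--         '.dmg',
--         '.iso',
--         '.flv',
--         '.m4v',
--         '.torrent',
--         '.ttf',
--         '.woff',
--         '.svg',
--         '.eot'
--     )
--
--     uri = uri.lower()
--     for suffix in suffixes:
--         if uri.endswith(suffix.lower()):
--             return True
--         else:
--             continue
--     return False
-- ===== SOURCE B (Python) =====
-- _EXTS = frozenset(
--     "js css xml less png jpg jpeg gif pdf doc txt ico rss zip mp3 rar exe "
--     "wmv avi ppt mpg mpeg tif wav mov psd ai xls mp4 m4a swf dat dmg iso "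
--     "flv m4v torrent ttf woff svg eot".split()
-- )
--
--
-- def check_suffix_match(uri):
--     _head, sep, ext = uri.lower().rpartition('.')
--     return sep == '.' and ext in _EXTS
-- ===== Notes on version B (the rewrite author's own statement) =====
-- stated objective: idiomatic
-- what changed: Replaces the loop over ~40 dotted suffixes with one rpartition at the last dot that splits off the final extension and a single frozenset membership test on the dot-less extension (the set is built once from a whitespace-split word string).
import Mathlib
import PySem

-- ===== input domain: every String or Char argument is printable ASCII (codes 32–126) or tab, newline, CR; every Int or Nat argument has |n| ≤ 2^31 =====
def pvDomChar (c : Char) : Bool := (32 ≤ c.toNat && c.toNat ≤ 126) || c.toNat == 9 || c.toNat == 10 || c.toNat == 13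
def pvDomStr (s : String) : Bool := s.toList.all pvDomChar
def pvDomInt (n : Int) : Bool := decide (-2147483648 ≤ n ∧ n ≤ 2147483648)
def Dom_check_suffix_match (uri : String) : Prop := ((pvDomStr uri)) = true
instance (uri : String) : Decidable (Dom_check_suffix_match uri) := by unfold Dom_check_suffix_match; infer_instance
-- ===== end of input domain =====

-- B replaces A's loop over ~40 dotted suffixes by one rpartition at the last '.' and a
-- set-membership test on the dot-less extension (idiomatic; same behaviour).

-- ===== PORT A =====
-- the tuple of dotted suffixes, in A's order
def pvSuffixes : List (List Char) :=
  [".js".toList, ".css".toList, ".xml".toList, ".less".toList, ".png".toList,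
   ".jpg".toList, ".jpeg".toList, ".gif".toList, ".pdf".toList, ".doc".toList,
   ".txt".toList, ".ico".toList, ".rss".toList, ".zip".toList, ".mp3".toList,
   ".rar".toList, ".exe".toList, ".wmv".toList, ".avi".toList, ".ppt".toList,
   ".mpg".toList, ".mpeg".toList, ".tif".toList, ".wav".toList, ".mov".toList,
   ".psd".toList, ".ai".toList, ".xls".toList, ".mp4".toList, ".m4a".toList,
   ".swf".toList, ".dat".toList, ".dmg".toList, ".iso".toList, ".flv".toList,
   ".m4v".toList, ".torrent".toList, ".ttf".toList, ".woff".toList,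
   ".svg".toList, ".eot".toList]

-- A's for-loop: try each suffix in order, return True on the first endswith hit
def pvLoopA : List (List Char) → List Char → Bool
  | [], _ => false
  | s :: rest, u =>
      if PySem.Chars.endswith u (PySem.Chars.lower s) then true else pvLoopA rest u

def check_suffix_match (uri : String) : Bool :=
  pvLoopA pvSuffixes (PySem.Chars.lower uri.toList)

-- ===== PORT B =====
-- the frozenset of dot-less extensions, built once from a whitespace-split word string
def pvExtWords : String :=
  "js css xml less png jpg jpeg gif pdf doc txt ico rss zip mp3 rar exe wmv avi ppt mpg mpeg tif wav mov psd ai xls mp4 m4a swf dat dmg iso flv m4v torrent ttf woff svg eot"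

def pvExtSet : List (List Char) := PySem.Chars.split₀ pvExtWords.toList

-- rpartition('.'): split at the LAST dot = scan the reversed string up to the first dot
def check_suffix_match_alt (uri : String) : Bool :=
  let l := PySem.Chars.lower uri.toList
  let r := l.reverse
  let extRev := r.takeWhile (fun c => c != '.')   -- reversed extension after the last dot
  r.contains '.' && pvExtSet.contains extRev.reverse  -- sep == '.' iff a dot exists

-- ===== PRECONDITION & SPEC =====
def Spec_check_suffix_match (uri : String) (out : Bool) : Prop := out = check_suffix_match_alt uri
instance (uri : String) (out : Bool) : Decidable (Spec_check_suffix_match uri out) := by unfold Spec_check_suffix_match; infer_instance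

-- ===== CLAIM (what is proved, stated in full; the proofs are below) =====
def Claim_equal_check_suffix_match : Prop := ∀ (uri : String), Dom_check_suffix_match uri → Spec_check_suffix_match uri (check_suffix_match uri)

-- ===== LEMMAS AND PROOFS =====

-- A's loop is the any-combinator over the suffix list
theorem pvLoopA_eq_any (ss : List (List Char)) (u : List Char) :
    pvLoopA ss u = ss.any (fun s => PySem.Chars.endswith u (PySem.Chars.lower s)) := by
  induction ss with
  | nil => rfl
  | cons s rest ih =>
      simp only [pvLoopA, List.any_cons, ih]
      by_cases h : PySem.Chars.endswith u (PySem.Chars.lower s) = true <;> simp [h]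

-- a dot-free block followed by '.' is a prefix of r iff r's dot-free head is exactly that block
theorem pvPrefix_dotfree (e r : List Char) (he : '.' ∉ e) :
    (e ++ ['.']) <+: r ↔ ('.' ∈ r ∧ r.takeWhile (fun c => c != '.') = e) := by
  induction e generalizing r with
  | nil =>
      cases r with
      | nil => simp
      | cons a t =>
          constructor
          · rintro ⟨u, hu⟩
            simp only [List.nil_append, List.cons_append] at hu
            cases hu
            simp [List.takeWhile]
          · rintro ⟨_, htw⟩
            simp only [List.takeWhile] at htw
            by_cases ha : (a != '.') = true
            · simp [ha] at htw
            · have : a = '.' := by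
                by_contra hne
                exact ha (by simpa using hne)
              exact ⟨t, by simp [this]⟩
  | cons c e' ih =>
      have hc : c ≠ '.' := fun h => he (h ▸ List.mem_cons_self)
      have he' : '.' ∉ e' := fun h => he (List.mem_cons_of_mem _ h)
      cases r with
      | nil => simp [List.takeWhile]
      | cons a t =>
          constructor
          · rintro ⟨u, hu⟩
            simp only [List.cons_append, List.append_assoc] at hu
            injection hu with h1 h2
            subst h1; subst h2
            have hp : (e' ++ ['.']) <+: (e' ++ '.' :: u) := ⟨u, by simp⟩
            have := (ih _ he').mp hp
            refine ⟨List.mem_cons_of_mem _ this.1, ?_⟩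
            have hcb : (c != '.') = true := by simpa using hc
            simp [List.takeWhile, hcb, this.2]
          · rintro ⟨hmem, htw⟩
            by_cases ha : a = '.'
            · subst ha
              simp [List.takeWhile] at htw
            · have ha' : (a != '.') = true := by simpa using ha
              simp only [List.takeWhile, ha', List.cons.injEq] at htw
              obtain ⟨rfl, h2⟩ := htw
              have hmem' : '.' ∈ t := by
                rcases List.mem_cons.mp hmem with h | h
                · exact absurd h.symm hc
                · exact h
              rcases (ih t he').mpr ⟨hmem', h2⟩ with ⟨u, hu⟩
              exact ⟨u, by simp [← hu]⟩

-- every extension in B's set is dot-free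
set_option maxRecDepth 8192 in
theorem pvExtSet_dotfree : ∀ e ∈ pvExtSet, '.' ∉ e := by decide

-- A's dotted suffixes are exactly B's extensions with a dot prepended, already lower-case
set_option maxRecDepth 8192 in
theorem pvSuffixes_eq : pvSuffixes = pvExtSet.map (fun e => '.' :: e) := by decide

theorem pvSuffixes_lower : ∀ s ∈ pvSuffixes, PySem.Chars.lower s = s := by decide

-- core equivalence on the lowered character list
theorem pvCore (u : List Char) :
    pvLoopA pvSuffixes u
      = (u.reverse.contains '.' && pvExtSet.contains (u.reverse.takeWhile (fun c => c != '.')).reverse) := by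
  rw [pvLoopA_eq_any]
  rw [Bool.eq_iff_iff]
  simp only [List.any_eq_true, Bool.and_eq_true, List.contains_eq_mem, decide_eq_true_eq]
  constructor
  · rintro ⟨s, hs, hend⟩
    have hlow := pvSuffixes_lower s hs
    rw [hlow] at hend
    rw [pvSuffixes_eq] at hs
    rcases List.mem_map.mp hs with ⟨e, he, rfl⟩
    have hsuf : ('.' :: e) <:+ u := (PySem.Chars.endswith_iff _ _).mp hend
    have hpre : (e.reverse ++ ['.']) <+: u.reverse := by
      have := List.reverse_prefix.mpr hsuf
      simpa using this
    have hdf : '.' ∉ e.reverse := by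
      simpa using pvExtSet_dotfree e he
    rcases (pvPrefix_dotfree e.reverse u.reverse hdf).mp hpre with ⟨hdot, htw⟩
    exact ⟨hdot, by simp [htw, he]⟩
  · rintro ⟨hdot, hmem⟩
    set e := (u.reverse.takeWhile (fun c => c != '.')).reverse with hedef
    have hdf : '.' ∉ e.reverse := by
      intro h
      rw [hedef] at h
      simp only [List.reverse_reverse] at h
      exact (by simpa using (List.mem_takeWhile_imp h) : ¬ ('.' = '.')) rfl
    have htw : u.reverse.takeWhile (fun c => c != '.') = e.reverse := by
      simp [hedef]
    have hpre := (pvPrefix_dotfree e.reverse u.reverse hdf).mpr ⟨hdot, htw⟩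
    have hsuf : ('.' :: e) <:+ u := by
      rw [← List.reverse_prefix]
      simpa using hpre
    refine ⟨'.' :: e, ?_, ?_⟩
    · rw [pvSuffixes_eq]
      exact List.mem_map.mpr ⟨e, hmem, rfl⟩
    · rw [pvSuffixes_lower _ (by rw [pvSuffixes_eq]; exact List.mem_map.mpr ⟨e, hmem, rfl⟩)]
      exact (PySem.Chars.endswith_iff _ _).mpr hsuf

-- ===== VERDICT (by name: the statement is the Claim_ definition above) =====
theorem check_suffix_match_spec : Claim_equal_check_suffix_match := by
  intro uri _
  unfold Spec_check_suffix_match check_suffix_match check_suffix_match_alt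
  exact pvCore (PySem.Chars.lower uri.toList)
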